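-- pv_equiv track=rewrite | github.com/mrigankpawagi/ProbeableProblems | code/q1/buggy/9_1.py | least_positive_index
-- ===== SOURCE A (Python) =====
-- def least_positive_index(data):
--     min_positive = float('inf')
--     min_index = -1
--     for i, num in enumerate(data):
--         if num > 0 and num <= min_positive:
--             min_positive = num
--             min_index = i
--     return min_index
-- ===== SOURCE B (Python) =====
-- def least_positive_index(data):
--     pairs = [(v, i) for i, v in enumerate(data) if v > 0]
--     if not pairs:
--         return -1
--     m = min(v for v, _ in pairs)
--     return max(i for v, i in pairs if v == m)
-- ===== Notes on version B (the rewrite author's own statement) =====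
-- stated objective: alternative
-- what changed: Replaces the single interleaved min-tracking scan with a filter-then-two-reductions decomposition: collect positive (value, index) pairs, take the minimum value, then the maximum index among ties (reproducing A's last-tie behaviour).
import Mathlib
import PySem

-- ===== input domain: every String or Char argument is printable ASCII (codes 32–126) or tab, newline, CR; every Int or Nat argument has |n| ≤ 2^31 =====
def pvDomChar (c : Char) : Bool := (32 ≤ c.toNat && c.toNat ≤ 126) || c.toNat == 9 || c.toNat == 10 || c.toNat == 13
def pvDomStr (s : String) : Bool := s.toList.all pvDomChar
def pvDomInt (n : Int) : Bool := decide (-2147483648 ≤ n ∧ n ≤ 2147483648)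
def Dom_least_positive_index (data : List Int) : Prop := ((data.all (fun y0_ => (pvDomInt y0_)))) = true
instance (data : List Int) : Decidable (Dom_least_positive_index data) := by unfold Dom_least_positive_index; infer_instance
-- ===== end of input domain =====

-- B replaces A's single interleaved min-tracking scan by a filter-then-two-reductions
-- decomposition (collect positive (value, index) pairs, min value, then max tie index); same cost.


-- ===== PORT A =====
-- min_positive = float('inf') is modelled as 'none' (no int has been stored yet);
-- 'num <= inf' is vacuously true, 'num <= some m' is num ≤ m — exact for int data.
def lpiLoopA : List (Int × Int) → Option Int → Int → Int
  | [], _, minIndex => minIndex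
  | (i, num) :: rest, minPositive, minIndex =>
    if decide (0 < num) && (match minPositive with
                            | none => true
                            | some m => decide (num ≤ m)) then
      lpiLoopA rest (some num) i
    else
      lpiLoopA rest minPositive minIndex

def least_positive_index (data : List Int) : Int :=
  lpiLoopA (PySem.List.enumerate data) none (-1)

-- ===== PORT B =====
-- pairs = [(v, i) for i, v in enumerate(data) if v > 0]
def lpiPairs (data : List Int) : List (Int × Int) :=
  (PySem.List.enumerate data).filterMap
    (fun p => if decide (0 < p.2) then some (p.2, p.1) else none)

def least_positive_index_alt (data : List Int) : Int :=
  match lpiPairs data with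
  | [] => -1
  | pairs@(_ :: _) =>
    match PySem.List.min? (pairs.map Prod.fst) (fun x => x) with
    | none => -1  -- unreachable: pairs nonempty
    | some m =>
      match PySem.List.max? ((pairs.filter (fun p => p.1 == m)).map Prod.snd) (fun x => x) with
      | none => -1  -- unreachable
      | some j => j

-- ===== PRECONDITION & SPEC =====
def Spec_least_positive_index (data : List Int) (out : Int) : Prop := out = least_positive_index_alt data
instance (data : List Int) (out : Int) : Decidable (Spec_least_positive_index data out) := by unfold Spec_least_positive_index; infer_instance

-- ===== CLAIM (what is proved, stated in full; the proofs are below) =====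
def Claim_equal_least_positive_index : Prop := ∀ (data : List Int), Dom_least_positive_index data → Spec_least_positive_index data (least_positive_index data)

-- ===== LEMMAS AND PROOFS =====

-- proof-side: one step of the running (min value, last tie index) state
def lpiStep (acc : Option (Int × Int)) (p : Int × Int) : Option (Int × Int) :=
  match acc with
  | none => some p
  | some (m, j) => if p.1 ≤ m then some p else some (m, j)

-- the fold of lpiStep from a 'some' accumulator is always 'some'
theorem lpiFoldl_isSome (P : List (Int × Int)) :
    ∀ a : Int × Int, ∃ r, P.foldl lpiStep (some a) = some r := by
  induction P with
  | nil => intro a; exact ⟨a, rfl⟩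
  | cons p tl ih =>
    intro a
    simp only [List.foldl_cons, lpiStep]
    by_cases h : p.1 ≤ a.1
    · simpa [h] using ih p
    · simpa [h] using ih a

-- A's loop equals the fold of lpiStep over the positive pairs, reading the index out at the end
theorem lpiLoopA_eq_foldl (es : List (Int × Int)) :
    ∀ (mp : Option Int) (mi : Int),
    lpiLoopA es mp mi =
      (match (es.filterMap (fun p => if decide (0 < p.2) then some (p.2, p.1) else none)).foldl
          lpiStep (mp.map (fun m => (m, mi))) with
       | none => mi
       | some r => r.2) := by
  induction es with
  | nil => intro mp mi; cases mp <;> rfl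
  | cons hd tl ih =>
    intro mp mi
    obtain ⟨i, num⟩ := hd
    by_cases hp : 0 < num
    · cases mp with
      | none =>
        simp only [lpiLoopA, List.filterMap_cons, hp, decide_true, Bool.true_and, if_true,
          List.foldl_cons, Option.map_none]
        rw [ih (some num) i]
        simp only [Option.map_some, lpiStep]
        cases hfr : List.foldl lpiStep (some (num, i))
          (tl.filterMap (fun p => if decide (0 < p.2) = true then some (p.2, p.1) else none)) with
        | none =>
          rcases lpiFoldl_isSome _ (num, i) with ⟨r, hr⟩
          rw [hfr] at hr; cases hr
        | some r => rfl
      | some m =>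
        simp only [lpiLoopA, List.filterMap_cons, hp, decide_true, Bool.true_and, if_true,
          List.foldl_cons, Option.map_some]
        by_cases hle : num ≤ m
        · simp only [hle, decide_true, if_true]
          rw [ih (some num) i]
          simp only [Option.map_some, lpiStep, hle, if_true]
          cases hfr : List.foldl lpiStep (some (num, i))
            (tl.filterMap (fun p => if decide (0 < p.2) = true then some (p.2, p.1) else none)) with
          | none =>
            rcases lpiFoldl_isSome _ (num, i) with ⟨r, hr⟩
            rw [hfr] at hr; cases hr
          | some r => rfl
        · simp only [hle, decide_false]
          rw [ih (some m) mi]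
          simp [lpiStep, hle]
    · simp only [lpiLoopA, List.filterMap_cons, hp, decide_false, Bool.false_and]
      exact ih mp mi


-- characterisation of the fold result on an index-increasing pair list
theorem lpiFoldl_spec (P : List (Int × Int)) :
    ∀ (a r : Int × Int),
    P.Pairwise (fun p q => p.2 < q.2) →
    (∀ p ∈ P, a.2 < p.2) →
    P.foldl lpiStep (some a) = some r →
    (r = a ∨ r ∈ P) ∧ (r.1 ≤ a.1 ∧ ∀ p ∈ P, r.1 ≤ p.1) ∧
      ((a.1 = r.1 → a.2 ≤ r.2) ∧ ∀ p ∈ P, p.1 = r.1 → p.2 ≤ r.2) := by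
  induction P with
  | nil =>
    intro a r _ _ h
    simp only [List.foldl_nil, Option.some.injEq] at h
    subst h
    exact ⟨Or.inl rfl, ⟨le_refl _, by simp⟩, ⟨fun _ => le_refl _, by simp⟩⟩
  | cons p tl ih =>
    intro a r hpw hidx h
    simp only [List.foldl_cons, lpiStep] at h
    rw [List.pairwise_cons] at hpw
    by_cases hle : p.1 ≤ a.1
    · simp only [hle, if_true] at h
      obtain ⟨hmem, ⟨hr1, hall⟩, ⟨htie, htieall⟩⟩ := ih p r hpw.2 hpw.1 h
      refine ⟨Or.inr (hmem.elim (fun e => e ▸ List.mem_cons_self) (List.mem_cons_of_mem p)),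
        ⟨le_trans hr1 hle, ?_⟩, ⟨?_, ?_⟩⟩
      · intro q hq
        rcases List.mem_cons.mp hq with e | hq
        · exact e ▸ hr1
        · exact hall q hq
      · intro he
        have hp2 : a.2 < p.2 := hidx p List.mem_cons_self
        have hpe : p.1 = r.1 := le_antisymm (he ▸ hle) hr1
        exact le_of_lt (lt_of_lt_of_le hp2 (htie hpe))
      · intro q hq he
        rcases List.mem_cons.mp hq with e | hq
        · exact e ▸ htie (e ▸ he)
        · exact htieall q hq he
    · simp only [hle, if_false] at h
      obtain ⟨hmem, ⟨hr1, hall⟩, ⟨htie, htieall⟩⟩ :=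
        ih a r hpw.2 (fun q hq => hidx q (List.mem_cons_of_mem p hq)) h
      refine ⟨hmem.elim Or.inl (fun m => Or.inr (List.mem_cons_of_mem p m)),
        ⟨hr1, ?_⟩, ⟨htie, ?_⟩⟩
      · intro q hq
        rcases List.mem_cons.mp hq with e | hq
        · exact e ▸ le_trans hr1 (le_of_lt (lt_of_not_ge hle))
        · exact hall q hq
      · intro q hq he
        rcases List.mem_cons.mp hq with e | hq
        · exact absurd (he ▸ hr1 : q.1 ≤ a.1) (e ▸ hle)
        · exact htieall q hq he

-- the positive pairs keep the enumerate indices strictly increasing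
theorem lpiPairs_pairwise (data : List Int) :
    (lpiPairs data).Pairwise (fun p q => p.2 < q.2) := by
  unfold lpiPairs
  rw [List.pairwise_filterMap]
  refine (PySem.List.pairwise_lt_enumerate data 0).imp ?_
  intro a b hab x hx y hy
  split at hx <;> cases hx
  split at hy <;> cases hy
  simpa using hab

theorem least_positive_index_eq (data : List Int) :
    least_positive_index data = least_positive_index_alt data := by
  unfold least_positive_index least_positive_index_alt
  rw [lpiLoopA_eq_foldl]
  simp only [Option.map_none]
  have hpairs : (PySem.List.enumerate data).filterMap
      (fun p => if decide (0 < p.2) = true then some (p.2, p.1) else none) = lpiPairs data := rfl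
  rw [hpairs]
  cases hP : lpiPairs data with
  | nil => simp
  | cons q Q =>
    have hpw := lpiPairs_pairwise data
    rw [hP, List.pairwise_cons] at hpw
    simp only [List.foldl_cons, lpiStep]
    rcases lpiFoldl_isSome Q q with ⟨r, hr⟩
    rw [hr]
    obtain ⟨hmem0, ⟨hle0, hleQ⟩, ⟨htie0, htieQ⟩⟩ := lpiFoldl_spec Q q r hpw.2 hpw.1 hr
    have hmem : r ∈ q :: Q := hmem0.elim (fun e => e ▸ List.mem_cons_self) (List.mem_cons_of_mem q)
    have hmin : ∀ p ∈ q :: Q, r.1 ≤ p.1 := by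
      intro p hp
      rcases List.mem_cons.mp hp with e | hp
      · exact e ▸ hle0
      · exact hleQ p hp
    have htie : ∀ p ∈ q :: Q, p.1 = r.1 → p.2 ≤ r.2 := by
      intro p hp
      rcases List.mem_cons.mp hp with e | hp
      · subst e; exact htie0
      · exact htieQ p hp
    -- min? over the values is r.1
    cases hm : PySem.List.min? ((q :: Q).map Prod.fst) (fun x => x) with
    | none =>
      rw [PySem.List.min?_eq_none_iff] at hm
      cases hm
    | some m =>
      show r.2 = (match PySem.List.max? (((q :: Q).filter (fun p => p.1 == m)).map Prod.snd)
          (fun x => x) with | none => (-1 : Int) | some j => j)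
      have hm_mem := PySem.List.min?_mem hm
      have hm_min := PySem.List.min?_isMin hm
      have hmr : m = r.1 := by
        rcases List.mem_map.mp hm_mem with ⟨p, hp, he⟩
        exact le_antisymm (hm_min r.1 (List.mem_map.mpr ⟨r, hmem, rfl⟩)) (he ▸ hmin p hp)
      subst hmr
      -- max? over the tie indices is r.2
      cases hx : PySem.List.max? (((q :: Q).filter (fun p => p.1 == r.1)).map Prod.snd)
          (fun x => x) with
      | none =>
        rw [PySem.List.max?_eq_none_iff, List.map_eq_nil_iff, List.filter_eq_nil_iff] at hx
        exact absurd (by simp) (hx r hmem)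
      | some j =>
        have hj_mem := PySem.List.max?_mem hx
        have hj_max := PySem.List.max?_isMax hx
        have : j = r.2 := by
          rcases List.mem_map.mp hj_mem with ⟨p, hp, he⟩
          rcases List.mem_filter.mp hp with ⟨hpmem, hpeq⟩
          refine le_antisymm (he ▸ htie p hpmem (by simpa using hpeq)) ?_
          exact hj_max r.2 (List.mem_map.mpr ⟨r, List.mem_filter.mpr ⟨hmem, by simp⟩, rfl⟩)
        exact this.symm

-- ===== VERDICT =====
theorem least_positive_index_spec : Claim_equal_least_positive_index := by
  intro data _
  unfold Spec_least_positive_index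
  exact least_positive_index_eq data
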